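-- pv_equiv track=rewrite | github.com/INFSELL/keyword_extraction | infsell.py | remove_brands
-- ===== SOURCE A (Python) =====
-- def remove_brands(keywords, brands):
--     res_keywords = []
--
--     for keyword in keywords:
--         is_brand = 0
--
--         for brand in brands:
--             if brand in keyword:
--                 is_brand = 1
--                 break
--
--         if is_brand == 0:
--             res_keywords.append(keyword)
--
--     return res_keywords
-- ===== SOURCE B (Python) =====
-- def remove_brands(keywords, brands):
--     # Staged filtering: one pass per brand over the surviving keywords,
--     # instead of a per-keyword scan over all brands with a flag and break.
--     res = list(keywords)
--     for brand in brands: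
--         res = [kw for kw in res if brand not in kw]
--     return res
-- ===== Notes on version B (the rewrite author's own statement) =====
-- stated objective: alternative
-- what changed: B inverts the loop nesting: it iterates over brands in the outer loop, filtering the surviving keyword list once per brand, instead of A's per-keyword inner brand scan with a flag and break.
import Mathlib
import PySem

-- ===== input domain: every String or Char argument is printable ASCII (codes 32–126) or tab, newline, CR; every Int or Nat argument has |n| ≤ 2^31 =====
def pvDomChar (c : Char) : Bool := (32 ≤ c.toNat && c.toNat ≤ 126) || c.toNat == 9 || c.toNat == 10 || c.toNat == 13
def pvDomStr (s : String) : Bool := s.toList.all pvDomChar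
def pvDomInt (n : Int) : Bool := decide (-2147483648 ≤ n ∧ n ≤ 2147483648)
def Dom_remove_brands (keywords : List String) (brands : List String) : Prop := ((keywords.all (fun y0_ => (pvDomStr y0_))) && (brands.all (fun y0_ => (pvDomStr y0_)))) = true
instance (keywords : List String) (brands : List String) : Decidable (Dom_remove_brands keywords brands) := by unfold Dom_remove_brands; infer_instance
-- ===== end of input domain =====

-- B inverts the loop nesting: it filters the surviving keyword list once per brand (staged passes
-- over brands) instead of A's per-keyword inner brand scan with a flag and break.


-- ===== PORT A =====
-- inner 'for brand in brands: if brand in keyword: is_brand = 1; break' loop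
def removeBrandsIsBrand (keyword : String) : List String → Int
  | [] => 0
  | b :: rest => if PySem.Str.isIn b keyword then 1 else removeBrandsIsBrand keyword rest

def remove_brands (keywords : List String) (brands : List String) : List String :=
  keywords.foldl (fun res kw => if removeBrandsIsBrand kw brands == 0 then res ++ [kw] else res) []

-- ===== PORT B =====
def remove_brands_alt (keywords : List String) (brands : List String) : List String :=
  brands.foldl (fun res brand => res.filter (fun kw => !(PySem.Str.isIn brand kw))) keywords

-- ===== PRECONDITION & SPEC =====
def Spec_remove_brands (keywords : List String) (brands : List String) (out : List String) : Prop := out = remove_brands_alt keywords brands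
instance (keywords : List String) (brands : List String) (out : List String) : Decidable (Spec_remove_brands keywords brands out) := by unfold Spec_remove_brands; infer_instance

-- ===== CLAIM (what is proved, stated in full; the proofs are below) =====
def Claim_equal_remove_brands : Prop := ∀ (keywords : List String) (brands : List String), Dom_remove_brands keywords brands → Spec_remove_brands keywords brands (remove_brands keywords brands)

-- ===== LEMMAS AND PROOFS =====
theorem removeBrandsIsBrand_eq_zero (kw : String) (brands : List String) :
    (removeBrandsIsBrand kw brands == 0) = !(brands.any (fun b => PySem.Str.isIn b kw)):= by
  induction brands with
  | nil => rfl
  | cons b rest ih =>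
    simp only [removeBrandsIsBrand, List.any_cons]
    by_cases h : PySem.Chars.isIn b.toList kw.toList = true
    · simp [PySem.Str.isIn, h]
    · simp only [PySem.Str.isIn] at ih ⊢
      simp [h, ih]

theorem foldl_filter_eq_filter_any (brands : List String) (xs : List String) :
    brands.foldl (fun res brand => res.filter (fun kw => !(PySem.Str.isIn brand kw))) xs
      = xs.filter (fun kw => !(brands.any (fun b => PySem.Str.isIn b kw))) := by
  induction brands generalizing xs with
  | nil => simp
  | cons b rest ih =>
    simp only [List.foldl_cons, ih, List.filter_filter]
    refine List.filter_congr ?_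
    intro kw _
    simp [List.any_cons, Bool.and_comm]

-- ===== VERDICT (by name: the statement is the Claim_ definition above) =====
theorem remove_brands_spec : Claim_equal_remove_brands := by
  intro keywords brands _
  show remove_brands keywords brands = remove_brands_alt keywords brands
  unfold remove_brands remove_brands_alt
  rw [PySem.List.foldl_append_if_eq_filter, List.nil_append,
    foldl_filter_eq_filter_any]
  refine List.filter_congr ?_
  intro kw _
  rw [removeBrandsIsBrand_eq_zero]
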